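-- pv_equiv track=rewrite | github.com/joshua-mali/app_doc_compare | extract_tables.py | is_same_coverage_type
-- ===== SOURCE A (Python) =====
-- def is_same_coverage_type(type1, type2):
--     """
--     A helper function to perform a smarter, keyword-based match between coverage types.
--     """
--     if not type1 or not type2:
--         return False
--     type1, type2 = type1.upper(), type2.upper()
--     KEYWORDS = {
--         "LIFE": ["LIFE"], "TPD": ["TPD", "TOTAL AND PERMANENT", "DISABLEMENT"],
--         "INCOME": ["INCOME PROTECTION", "INCOME SECURE"], "TRAUMA": ["TRAUMA", "CRITICAL ILLNESS", "RECOVERY INSURANCE"]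
--     }
--     for category, keywords in KEYWORDS.items():
--         match1 = any(keyword in type1 for keyword in keywords)
--         match2 = any(keyword in type2 for keyword in keywords)
--         if match1 and match2:
--             return True
--     return False
-- ===== SOURCE B (Python) =====
-- # Flattened keyword -> category-bit table; each string is reduced to one integer
-- # bitmask of matched categories, and the test is a single bitwise AND.
-- FLAT_KEYWORD_BITS = [
--     ("LIFE", 1),
--     ("TPD", 2), ("TOTAL AND PERMANENT", 2), ("DISABLEMENT", 2),
--     ("INCOME PROTECTION", 4), ("INCOME SECURE", 4),
--     ("TRAUMA", 8), ("CRITICAL ILLNESS", 8), ("RECOVERY INSURANCE", 8),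
-- ]
--
-- def _category_mask(text):
--     mask = 0
--     for keyword, bit in FLAT_KEYWORD_BITS:
--         if keyword in text:
--             mask |= bit
--     return mask
--
-- def is_same_coverage_type(type1, type2):
--     if not type1 or not type2:
--         return False
--     return (_category_mask(type1.upper()) & _category_mask(type2.upper())) != 0
-- ===== Notes on version B (the rewrite author's own statement) =====
-- stated objective: alternative
-- what changed: Replaces A's per-category loop (nested any() over a dict of keyword lists, with an early return when both strings match a category) by a flat keyword-to-bit table: each string is independently reduced to an integer bitmask of matched categories, and the result is whether the bitwise AND of the two masks is nonzero.
import Mathlib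
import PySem

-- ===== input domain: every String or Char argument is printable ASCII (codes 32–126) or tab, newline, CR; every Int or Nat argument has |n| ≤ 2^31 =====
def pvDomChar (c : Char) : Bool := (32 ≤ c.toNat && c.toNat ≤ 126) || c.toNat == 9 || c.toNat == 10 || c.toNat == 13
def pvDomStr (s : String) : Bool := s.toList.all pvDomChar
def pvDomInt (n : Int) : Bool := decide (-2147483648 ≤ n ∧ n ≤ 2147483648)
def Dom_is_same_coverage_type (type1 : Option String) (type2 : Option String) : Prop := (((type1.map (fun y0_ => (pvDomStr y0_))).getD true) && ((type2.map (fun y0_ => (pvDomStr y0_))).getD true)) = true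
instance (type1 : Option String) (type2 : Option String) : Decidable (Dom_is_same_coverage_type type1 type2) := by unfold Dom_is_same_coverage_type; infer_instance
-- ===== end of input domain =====

-- B replaces A's per-category loop with early return by a flat keyword->bit table:
-- each string is reduced independently to an integer bitmask of matched categories
-- and the answer is whether the bitwise AND of the two masks is nonzero (objective: alternative).

-- ===== PORT A =====
-- the KEYWORDS dict literal (same-order association list)
def kwTable : List (String × List String) :=
  [("LIFE", ["LIFE"]),
   ("TPD", ["TPD", "TOTAL AND PERMANENT", "DISABLEMENT"]),
   ("INCOME", ["INCOME PROTECTION", "INCOME SECURE"]),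
   ("TRAUMA", ["TRAUMA", "CRITICAL ILLNESS", "RECOVERY INSURANCE"])]

-- the 'for category, keywords in KEYWORDS.items():' loop with its early 'return True'
def kwLoop (u1 u2 : String) : List (String × List String) → Bool
  | [] => false
  | (_, kws) :: rest =>
    if (kws.any (fun k => PySem.Str.isIn k u1)) && (kws.any (fun k => PySem.Str.isIn k u2)) then
      true
    else kwLoop u1 u2 rest

def is_same_coverage_type (type1 : Option String) (type2 : Option String) : Bool :=
  match type1, type2 with
  | some t1, some t2 =>
    if t1 = "" || t2 = "" then false          -- 'if not type1 or not type2: return False'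
    else kwLoop (PySem.Str.upper t1) (PySem.Str.upper t2) kwTable
  | _, _ => false                              -- None is falsy

-- ===== PORT B =====
-- FLAT_KEYWORD_BITS: flat keyword -> category-bit table
def flatKw : List (String × Int) :=
  [("LIFE", 1),
   ("TPD", 2), ("TOTAL AND PERMANENT", 2), ("DISABLEMENT", 2),
   ("INCOME PROTECTION", 4), ("INCOME SECURE", 4),
   ("TRAUMA", 8), ("CRITICAL ILLNESS", 8), ("RECOVERY INSURANCE", 8)]

-- '_category_mask(text)': one pass over the flat table accumulating 'mask |= bit'
def categoryMask (text : String) : Int :=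
  flatKw.foldl (fun mask kb => if PySem.Str.isIn kb.1 text then Int.lor mask kb.2 else mask) 0

def is_same_coverage_type_alt (type1 : Option String) (type2 : Option String) : Bool :=
  match type1 with
  | none => false
  | some t1 =>
    match type2 with
    | none => false
    | some t2 =>
      if t1 = "" || t2 = "" then false
      else decide (Int.land (categoryMask (PySem.Str.upper t1)) (categoryMask (PySem.Str.upper t2)) ≠ 0)

-- ===== PRECONDITION & SPEC =====
def Spec_is_same_coverage_type (type1 : Option String) (type2 : Option String) (out : Bool) : Prop := out = is_same_coverage_type_alt type1 type2
instance (type1 : Option String) (type2 : Option String) (out : Bool) : Decidable (Spec_is_same_coverage_type type1 type2 out) := by unfold Spec_is_same_coverage_type; infer_instance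

-- ===== CLAIM (what is proved, stated in full; the proofs are below) =====
def Claim_equal_is_same_coverage_type : Prop := ∀ (type1 : Option String) (type2 : Option String), Dom_is_same_coverage_type type1 type2 → Spec_is_same_coverage_type type1 type2 (is_same_coverage_type type1 type2)

-- ===== LEMMAS AND PROOFS =====
-- the mask fold equals the bit-or of one bit per matched category
lemma categoryMask_eq (u : String) :
    categoryMask u =
      Int.lor (Int.lor (Int.lor
        (if PySem.Str.isIn "LIFE" u then (1:Int) else 0)
        (if PySem.Str.isIn "TPD" u || (PySem.Str.isIn "TOTAL AND PERMANENT" u || PySem.Str.isIn "DISABLEMENT" u) then 2 else 0))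
        (if PySem.Str.isIn "INCOME PROTECTION" u || PySem.Str.isIn "INCOME SECURE" u then 4 else 0))
        (if PySem.Str.isIn "TRAUMA" u || (PySem.Str.isIn "CRITICAL ILLNESS" u || PySem.Str.isIn "RECOVERY INSURANCE" u) then 8 else 0) := by
  simp only [categoryMask, flatKw, List.foldl]
  generalize PySem.Str.isIn "LIFE" u = k1
  generalize PySem.Str.isIn "TPD" u = k2
  generalize PySem.Str.isIn "TOTAL AND PERMANENT" u = k3
  generalize PySem.Str.isIn "DISABLEMENT" u = k4
  generalize PySem.Str.isIn "INCOME PROTECTION" u = k5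
  generalize PySem.Str.isIn "INCOME SECURE" u = k6
  generalize PySem.Str.isIn "TRAUMA" u = k7
  generalize PySem.Str.isIn "CRITICAL ILLNESS" u = k8
  generalize PySem.Str.isIn "RECOVERY INSURANCE" u = k9
  revert k1 k2 k3 k4 k5 k6 k7 k8 k9
  decide

-- over category bitmasks, 'AND-nonzero' equals A's early-return loop
lemma land_ne_zero_eq (a1 a2 a3 a4 b1 b2 b3 b4 : Bool) :
    decide (Int.land
      (Int.lor (Int.lor (Int.lor (if a1 then (1:Int) else 0) (if a2 then 2 else 0)) (if a3 then 4 else 0)) (if a4 then 8 else 0))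
      (Int.lor (Int.lor (Int.lor (if b1 then (1:Int) else 0) (if b2 then 2 else 0)) (if b3 then 4 else 0)) (if b4 then 8 else 0)) ≠ 0)
      = (if a1 && b1 then true else if a2 && b2 then true
         else if a3 && b3 then true else if a4 && b4 then true else false) := by
  revert a1 a2 a3 a4 b1 b2 b3 b4
  decide

lemma kwLoop_eq_mask (u1 u2 : String) :
    kwLoop u1 u2 kwTable = decide (Int.land (categoryMask u1) (categoryMask u2) ≠ 0) := by
  rw [categoryMask_eq u1, categoryMask_eq u2, land_ne_zero_eq]
  simp only [kwLoop, kwTable, List.any_cons, List.any_nil, Bool.or_false]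

-- ===== VERDICT (by name: the statement is the Claim_ definition above) =====
theorem is_same_coverage_type_spec : Claim_equal_is_same_coverage_type := by
  intro type1 type2 _
  unfold Spec_is_same_coverage_type is_same_coverage_type is_same_coverage_type_alt
  match type1, type2 with
  | none, none => rfl
  | none, some _ => rfl
  | some _, none => rfl
  | some t1, some t2 =>
    by_cases h : t1 = "" ∨ t2 = ""
    · rcases h with h | h <;> simp [h]
    · push Not at h
      simp [h.1, h.2, kwLoop_eq_mask]
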